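-- pv_equiv track=rewrite | github.com/ViniDias1/UFS-code-Exercises | Projetos-Arq-de-Computadores/poxim2-ENVIADO.py | completaZero
-- ===== SOURCE A (Python) =====
-- def completaZero(b):
--     for i in range(32):
--         bms = "0"
--         if len(b) < 32:
--             b = bms + b
--         else:
--             break
--     return b
-- ===== SOURCE B (Python) =====
-- def completaZero(b):
--     # closed form: compute the missing count and prepend all zeros at once
--     return "0" * (32 - len(b)) + b if len(b) < 32 else b
-- ===== Notes on version B (the rewrite author's own statement) =====
-- stated objective: simpler
-- what changed: Replaces the 32-iteration prepend-one-zero-at-a-time loop with a single closed-form computation of the missing count and one string multiplication.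
import Mathlib
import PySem

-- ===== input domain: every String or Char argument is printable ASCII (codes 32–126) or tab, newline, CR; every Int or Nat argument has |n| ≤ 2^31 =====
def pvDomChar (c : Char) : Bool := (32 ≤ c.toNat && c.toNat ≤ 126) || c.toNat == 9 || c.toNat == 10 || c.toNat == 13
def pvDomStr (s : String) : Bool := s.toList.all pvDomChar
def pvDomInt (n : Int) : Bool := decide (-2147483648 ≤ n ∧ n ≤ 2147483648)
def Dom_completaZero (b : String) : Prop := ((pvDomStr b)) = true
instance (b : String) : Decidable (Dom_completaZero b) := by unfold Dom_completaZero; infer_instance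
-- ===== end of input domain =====

-- B replaces A's 32-iteration one-zero-at-a-time prepend loop with a single closed-form padding (objective: simpler).
-- ===== PORT A =====
-- loop 'for i in range(32)' with early break, transliterated as fuel recursion on 32
def completaZeroLoop : Nat → List Char → List Char
  | 0, b => b
  | n+1, b => if b.length < 32 then completaZeroLoop n ('0' :: b) else b

def completaZero (b : String) : String := String.ofList (completaZeroLoop 32 b.toList)

-- ===== PORT B =====
def completaZero_alt (b : String) : String :=
  if b.toList.length < 32 then String.ofList (List.replicate (32 - b.toList.length) '0' ++ b.toList) else b

-- ===== PRECONDITION & SPEC =====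
def Spec_completaZero (b : String) (out : String) : Prop := out = completaZero_alt b
instance (b : String) (out : String) : Decidable (Spec_completaZero b out) := by unfold Spec_completaZero; infer_instance

-- ===== CLAIM (what is proved, stated in full; the proofs are below) =====
def Claim_equal_completaZero : Prop := ∀ (b : String), Dom_completaZero b → Spec_completaZero b (completaZero b)

-- ===== LEMMAS AND PROOFS =====

-- ===== VERDICT (by name: the statement is the Claim_ definition above) =====
theorem completaZeroLoop_eq (n : Nat) (b : List Char) (h : 32 ≤ n + b.length) :
    completaZeroLoop n b = List.replicate (32 - b.length) '0' ++ b := by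
  induction n generalizing b with
  | zero =>
    simp [completaZeroLoop]
    omega
  | succ n ih =>
    by_cases hb : b.length < 32
    · rw [completaZeroLoop, if_pos hb, ih ('0' :: b) (by simp; omega)]
      have : 32 - b.length = (32 - ('0' :: b).length) + 1 := by simp; omega
      rw [this, List.replicate_succ']
      simp
    · rw [completaZeroLoop, if_neg hb]
      have : 32 - b.length = 0 := by omega
      simp [this]

theorem completaZero_spec : Claim_equal_completaZero := by
  intro b _
  unfold Spec_completaZero completaZero completaZero_alt
  rw [completaZeroLoop_eq 32 b.toList (by omega)]
  by_cases h : b.toList.length < 32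
  · rw [if_pos h]
  · rw [if_neg h]
    have h0 : 32 - b.toList.length = 0 := by omega
    rw [h0, List.replicate, List.nil_append]
    exact String.ofList_toList
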